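-- pv_equiv track=rewrite | github.com/Hamulda/new-hledac | brain/inference_engine.py | _select_canonical_name
-- ===== SOURCE A (Python) =====
-- from typing import Any, Dict, List, Optional, Set, Tuple, Iterator, Callable
--
-- def _select_canonical_name(names: List[str]) -> str:
--     """Select the most canonical name from a list."""
--     if not names:
--         return ""
--
--     # Prefer longer, more specific names
--     scored_names = [
--         (name, len(name) + name.count(" ") * 2)
--         for name in names
--     ]
--     scored_names.sort(key=lambda x: x[1], reverse=True)
--
--     return scored_names[0][0]
-- ===== SOURCE B (Python) =====
-- from typing import List
--
--
-- def _select_canonical_name(names: List[str]) -> str: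
--     """Select the most canonical name from a list."""
--     if not names:
--         return ""
--     # Single linear scan: max() returns the first name with the highest
--     # score, matching the reverse-stable sort's head.
--     return max(names, key=lambda name: len(name) + name.count(" ") * 2)
-- ===== Notes on version B (the rewrite author's own statement) =====
-- stated objective: simpler
-- what changed: Replaces the materialized (name, score) pair list plus descending stable sort plus index-0 access with a single linear-scan max(names, key=...) that tracks the first maximal name.
import Mathlib
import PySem

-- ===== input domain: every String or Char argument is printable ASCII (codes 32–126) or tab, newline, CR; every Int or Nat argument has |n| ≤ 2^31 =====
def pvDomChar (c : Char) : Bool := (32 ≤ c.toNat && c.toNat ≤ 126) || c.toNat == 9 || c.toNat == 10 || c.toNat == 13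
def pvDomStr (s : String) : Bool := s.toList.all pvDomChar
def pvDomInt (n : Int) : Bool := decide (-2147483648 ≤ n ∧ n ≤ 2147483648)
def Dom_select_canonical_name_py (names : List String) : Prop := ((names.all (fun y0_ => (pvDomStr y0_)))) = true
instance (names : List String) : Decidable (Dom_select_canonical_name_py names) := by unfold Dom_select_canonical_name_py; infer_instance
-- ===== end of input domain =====

-- B replaces A's (name, score) pair list + descending stable sort + index-0 access
-- with a single-pass max(names, key=...) for simplicity; return values proved equal.


-- ===== PORT A =====
-- len(name) + name.count(" ") * 2
def scoreA (name : String) : Int := PySem.Str.len name + PySem.Str.count name " " * 2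

def select_canonical_name_py (names : List String) : String :=
  if names = [] then ""
  else
    let scored := names.map (fun name => (name, scoreA name))
    -- scored_names.sort(key=lambda x: x[1], reverse=True); scored_names[0][0]
    -- head? fallback "" is unreachable: scored is nonempty here
    match (PySem.List.sorted scored (fun x => x.2) true).head? with
    | some p => p.1
    | none => ""

-- ===== PORT B =====
def scoreB (name : String) : Int := PySem.Str.len name + PySem.Str.count name " " * 2

def select_canonical_name_py_alt (names : List String) : String :=
  if names = [] then ""
  else
    -- max(names, key=lambda name: len(name) + name.count(" ") * 2)
    -- getD "" is unreachable: names is nonempty here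
    (PySem.List.max? names scoreB).getD ""

-- ===== PRECONDITION & SPEC =====
def Spec_select_canonical_name_py (names : List String) (out : String) : Prop := out = select_canonical_name_py_alt names
instance (names : List String) (out : String) : Decidable (Spec_select_canonical_name_py names out) := by unfold Spec_select_canonical_name_py; infer_instance

-- ===== CLAIM (what is proved, stated in full; the proofs are below) =====
def Claim_equal_select_canonical_name_py : Prop := ∀ (names : List String), Dom_select_canonical_name_py names → Spec_select_canonical_name_py names (select_canonical_name_py names)

-- ===== LEMMAS AND PROOFS =====

-- B's running-max step, in matcher-free form
def maxStep (acc : Option String) (x : String) : Option String :=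
  acc.elim (some x) (fun m => if scoreB m < scoreB x then some x else some m)

-- head of insertBy is decided by the old head alone
theorem head?_insertBy {α : Type} (before : α → α → Bool) (x : α) (acc : List α) :
    (PySem.List.insertBy before x acc).head? =
      match acc.head? with
      | none => some x
      | some y => if before x y then some x else some y := by
  cases acc with
  | nil => simp [PySem.List.insertBy]
  | cons y ys =>
    by_cases h : before x y = true <;> simp [PySem.List.insertBy, h]

-- the head of A's reverse-stable insertion-sort fold tracks B's running first-max
theorem head_fold_eq_max (l : List String) (acc : List (String × Int)) (m : Option String)
    (h : acc.head? = m.map (fun n => (n, scoreA n))) :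
    (l.foldl (fun a n =>
        PySem.List.insertBy (fun a b => decide ((b : String × Int).2 < a.2))
          (n, scoreA n) a) acc).head?
      = (l.foldl maxStep m).map (fun n => (n, scoreA n)) := by
  induction l generalizing acc m with
  | nil => simpa using h
  | cons n t ih =>
    simp only [List.foldl_cons]
    apply ih
    rw [head?_insertBy, h]
    cases m with
    | none => simp [maxStep]
    | some mm =>
      by_cases hc : scoreB mm < scoreB n
      · simp [maxStep, hc, show scoreA mm < scoreA n from hc]
      · simp [maxStep, hc, show ¬ scoreA mm < scoreA n from hc]

-- PySem.List.max? is exactly the maxStep fold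
theorem max?_eq_foldl_maxStep (xs : List String) :
    PySem.List.max? xs scoreB = xs.foldl maxStep none := by
  unfold PySem.List.max?
  congr 1
  funext acc x
  cases acc <;> rfl

-- ===== VERDICT (by name: the statement is the Claim_ definition above) =====
theorem select_canonical_name_py_spec : Claim_equal_select_canonical_name_py := by
  intro names _
  show select_canonical_name_py names = select_canonical_name_py_alt names
  unfold select_canonical_name_py select_canonical_name_py_alt
  by_cases h : names = []
  · simp [h]
  · simp only [h]
    rw [PySem.List.sorted_rev_eq_foldl_insertBy, List.foldl_map]
    rw [head_fold_eq_max names [] none (by simp)]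
    rw [max?_eq_foldl_maxStep]
    cases hm : names.foldl maxStep none with
    | none => simp
    | some v => simp
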